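-- pv_equiv track=rewrite | github.com/Bluemaster05/College-Classes | 215-CPTR/Lab/9-17-24/Reallab/lab2.py | is_legal_move
-- ===== SOURCE A (Python) =====
-- rootdict = {
--     "36": 6,
--     "25": 5,
--     "16": 4,
--     "9": 3,
--     "4": 2
-- }
--
-- def is_legal_move(puzzle : str, tile_to_move : str) -> bool:
--     """Determines whether it is possible to move tile_to_move into the empty spot.
--     >>> is_legal_move("1-23", "2")
--     False
--     >>> is_legal_move("-123", "1")
--     True
--     >>> is_legal_move("-123", "2")
--     True
--     >>> is_legal_move("-123", "3")
--     False
--     >>> is_legal_move("123-", "3")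
--     True
--     >>> is_legal_move("1928-3746", "3")
--     True
--     >>> is_legal_move("1928-3746", "8")
--     True
--     >>> is_legal_move("1928-3746", "9")
--     True
--     >>> is_legal_move("1928-3746", "4")
--     True
--     >>> is_legal_move("1928-3746", "1")
--     False
--     >>> is_legal_move("1928-3746", "6")
--     False
--     """
--     numRows = int(rootdict[str(len(puzzle))])
--     puzzleList = list(puzzle)
--     puzzle3D = []
--     puzzleIndex = 0
--     # Map puzzle string into Nested List
--     for index in range(numRows):
--         newline = []
--         for index2 in range(numRows):
--             newline.append(puzzleList[puzzleIndex])
--             puzzleIndex += 1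
--         puzzle3D.append(newline)
--     rowindex = 0
--     #Find "-" Column and Row index in the Nested List
--     for row in puzzle3D:
--         if "-" in row:
--             rowindex = puzzle3D.index(row)
--     colindex = puzzle3D[rowindex].index("-")
--     possibleMoves = []
--     #Determine all possible moves
--     for item in puzzle3D[rowindex]:
--         if colindex == 0:
--             if item == puzzle3D[rowindex][colindex + 1]:
--                 possibleMoves.append(item)
--         elif colindex == numRows - 1:
--             if item == puzzle3D[rowindex][colindex - 1]:
--                 possibleMoves.append(item)
--         else:
--             if item == puzzle3D[rowindex][colindex + 1] or item == puzzle3D[rowindex][colindex - 1]: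
--                 possibleMoves.append(item)
--     colList = []
--     for i in range(numRows):
--         colList.append(puzzle3D[i][colindex])
--     for item in colList:
--         if rowindex == 0:
--             if item == puzzle3D[rowindex + 1][colindex]:
--                 possibleMoves.append(item)
--         elif rowindex == numRows - 1:
--             if item == puzzle3D[rowindex - 1][colindex]:
--                 possibleMoves.append(item)
--         else:
--             if item == puzzle3D[rowindex + 1][colindex] or item == puzzle3D[rowindex - 1][colindex]:
--                 possibleMoves.append(item)
--     if tile_to_move in possibleMoves:
--         return True
--     return False
-- ===== SOURCE B (Python) =====
-- rootdict = {
--     "36": 6,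
--     "25": 5,
--     "16": 4,
--     "9": 3,
--     "4": 2
-- }
--
-- def is_legal_move(puzzle: str, tile_to_move: str) -> bool:
--     """Flat-string version: locate the single '-' and compare tile_to_move
--     with the in-bounds orthogonal neighbours of that cell."""
--     n = rootdict[str(len(puzzle))]
--     idx = puzzle.index("-")
--     row, col = divmod(idx, n)
--     neighbors = []
--     if col > 0:
--         neighbors.append(puzzle[idx - 1])
--     if col < n - 1:
--         neighbors.append(puzzle[idx + 1])
--     if row > 0:
--         neighbors.append(puzzle[idx - n])
--     if row < n - 1:
--         neighbors.append(puzzle[idx + n])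
--     return tile_to_move in neighbors
-- ===== Notes on version B (the rewrite author's own statement) =====
-- stated objective: simpler
-- what changed: B drops A's nested-list grid reconstruction and row/column collection loops entirely: it finds the single '-' in the flat string with str.index, derives (row,col) by divmod, and compares tile_to_move against the in-bounds orthogonal neighbour characters computed by index arithmetic.
-- outside the precondition, e.g. on is_legal_move('-1-2', '2'): A returns True, B returns False; on is_legal_move('12345', '1'): A raises KeyError, B raises KeyError; on is_legal_move('1234', '1'): A raises ValueError, B raises ValueError
import Mathlib
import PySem

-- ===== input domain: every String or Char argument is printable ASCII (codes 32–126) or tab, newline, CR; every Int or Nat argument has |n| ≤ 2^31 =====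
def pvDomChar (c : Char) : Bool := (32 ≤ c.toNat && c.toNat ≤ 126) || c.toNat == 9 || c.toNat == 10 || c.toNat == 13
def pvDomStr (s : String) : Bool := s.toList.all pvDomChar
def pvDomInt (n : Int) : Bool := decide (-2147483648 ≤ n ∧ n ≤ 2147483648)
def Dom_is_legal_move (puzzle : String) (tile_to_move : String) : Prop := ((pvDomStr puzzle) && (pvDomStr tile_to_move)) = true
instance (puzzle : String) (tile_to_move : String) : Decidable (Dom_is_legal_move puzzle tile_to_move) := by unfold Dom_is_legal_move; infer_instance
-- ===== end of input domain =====

-- B drops A's nested-list grid reconstruction and works on the flat string (find the '-', divmod,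
-- compare with the in-bounds orthogonal neighbour characters); equal return value on Pre_.

-- ===== PORT A =====
-- module-level constant rootdict
def pvRootdict : PySem.Dict String Int :=
  PySem.Dict.ofList [("36", 6), ("25", 5), ("16", 4), ("9", 3), ("4", 2)]

-- the two nested 'for index in range(numRows)' loops building puzzle3D (state: (puzzle3D, puzzleIndex));
-- puzzleList[puzzleIndex] is ported as getD (in range on every input Pre_ admits)
def pvGridA (cs : List Char) (n : Nat) : List (List Char) × Nat :=
  (List.range n).foldl
    (fun st _ =>
      let inner := (List.range n).foldl
        (fun (st2 : List Char × Nat) _ => (st2.1 ++ [cs.getD st2.2 ' '], st2.2 + 1))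
        ([], st.2)
      (st.1 ++ [inner.1], inner.2))
    ([], 0)

-- body of A after numRows = int(rootdict[str(len(puzzle))])
def pvABody (cs : List Char) (tl : List Char) (n : Nat) : Bool :=
  let p3 := (pvGridA cs n).1
  let rowindex := p3.foldl
    (fun ri row => if '-' ∈ row then (PySem.List.index? p3 row).getD 0 else ri) 0
  let colindex := (PySem.List.index? (p3.getD rowindex []) '-').getD 0
  let moves1 := (p3.getD rowindex []).foldl
    (fun acc item =>
      if colindex == 0 then
        (if item == (p3.getD rowindex []).getD (colindex + 1) ' ' then acc ++ [item] else acc)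
      else if colindex == n - 1 then
        (if item == (p3.getD rowindex []).getD (colindex - 1) ' ' then acc ++ [item] else acc)
      else
        (if item == (p3.getD rowindex []).getD (colindex + 1) ' '
            || item == (p3.getD rowindex []).getD (colindex - 1) ' ' then acc ++ [item] else acc))
    []
  let colList := (List.range n).foldl (fun acc i => acc ++ [(p3.getD i []).getD colindex ' ']) []
  let moves := colList.foldl
    (fun acc item =>
      if rowindex == 0 then
        (if item == (p3.getD (rowindex + 1) []).getD colindex ' ' then acc ++ [item] else acc)
      else if rowindex == n - 1 then
        (if item == (p3.getD (rowindex - 1) []).getD colindex ' ' then acc ++ [item] else acc)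
      else
        (if item == (p3.getD (rowindex + 1) []).getD colindex ' '
            || item == (p3.getD (rowindex - 1) []).getD colindex ' ' then acc ++ [item] else acc))
    moves1
  moves.any (fun item => tl == [item])

def is_legal_move (puzzle : String) (tile_to_move : String) : Bool :=
  match PySem.Dict.get? pvRootdict (PySem.Int.toStr (puzzle.length : Int)) with
  | none => false   -- Python raises KeyError here; excluded by Pre_
  | some numRows => pvABody puzzle.toList tile_to_move.toList numRows.toNat

-- ===== PORT B =====
def pvBBody (cs : List Char) (tl : List Char) (n : Nat) : Bool :=
  match PySem.List.index? cs '-' with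
  | none => false   -- Python raises ValueError here; excluded by Pre_
  | some idx =>
    let row := idx / n
    let col := idx % n
    let neighbors : List Char :=
      (if 0 < col then [cs.getD (idx - 1) ' '] else []) ++
      (if col < n - 1 then [cs.getD (idx + 1) ' '] else []) ++
      (if 0 < row then [cs.getD (idx - n) ' '] else []) ++
      (if row < n - 1 then [cs.getD (idx + n) ' '] else [])
    neighbors.any (fun c => tl == [c])

def is_legal_move_alt (puzzle : String) (tile_to_move : String) : Bool :=
  match PySem.Dict.get? pvRootdict (PySem.Int.toStr (puzzle.length : Int)) with
  | none => false   -- KeyError; excluded by Pre_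
  | some numRows => pvBBody puzzle.toList tile_to_move.toList numRows.toNat

-- ===== PRECONDITION & SPEC =====
-- Pre_ excludes lengths not in rootdict (A raises KeyError) and puzzles without '-' (A raises
-- ValueError), and puzzles holding more than one '-' — there A's last-row/first-column tie-break
-- through list.index is accidental and B's first-'-' choice is as defensible.
def Pre_is_legal_move (puzzle : String) (tile_to_move : String) : Prop :=
  (puzzle.length = 4 ∨ puzzle.length = 9 ∨ puzzle.length = 16 ∨ puzzle.length = 25 ∨ puzzle.length = 36)
  ∧ puzzle.toList.count '-' = 1
instance (puzzle : String) (tile_to_move : String) : Decidable (Pre_is_legal_move puzzle tile_to_move) := by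
  unfold Pre_is_legal_move; infer_instance

def pvWitness_is_legal_move : String × String := ("-123", "1")

def Spec_is_legal_move (puzzle : String) (tile_to_move : String) (out : Bool) : Prop := out = is_legal_move_alt puzzle tile_to_move
instance (puzzle : String) (tile_to_move : String) (out : Bool) : Decidable (Spec_is_legal_move puzzle tile_to_move out) := by unfold Spec_is_legal_move; infer_instance

-- ===== CLAIM (what is proved, stated in full; the proofs are below) =====
def Claim_equal_is_legal_move : Prop := ∀ (puzzle : String) (tile_to_move : String), Dom_is_legal_move puzzle tile_to_move → Pre_is_legal_move puzzle tile_to_move → Spec_is_legal_move puzzle tile_to_move (is_legal_move puzzle tile_to_move)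

-- ===== LEMMAS AND PROOFS =====

lemma pvStep_eq (b1 b2 : Bool) (u v : Char) :
    (fun (acc : List Char) item =>
      if b1 then (if item == u then acc ++ [item] else acc)
      else if b2 then (if item == v then acc ++ [item] else acc)
      else (if item == u || item == v then acc ++ [item] else acc))
    = fun acc item =>
        if (if b1 then item == u else if b2 then item == v else (item == u || item == v))
        then acc ++ [item] else acc := by
  funext acc item
  cases b1 <;> cases b2 <;> simp

lemma pvAnyCongr (l₁ l₂ : List Char) (tl : List Char) (h : ∀ c, c ∈ l₁ ↔ c ∈ l₂) :
    l₁.any (fun c => tl == [c]) = l₂.any (fun c => tl == [c]) := by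
  apply Bool.eq_iff_iff.mpr
  simp only [List.any_eq_true]
  exact ⟨fun ⟨c, hc, hf⟩ => ⟨c, (h c).mp hc, hf⟩, fun ⟨c, hc, hf⟩ => ⟨c, (h c).mpr hc, hf⟩⟩

lemma pvRowOf (n r R C : Nat) (hC : C < n) :
    (r * n ≤ R * n + C ∧ R * n + C < r * n + n) ↔ r = R := by
  constructor
  · rintro ⟨h1, h2⟩
    rcases Nat.lt_trichotomy r R with h | h | h
    · have : (r + 1) * n ≤ R * n := Nat.mul_le_mul_right n h
      simp only [Nat.succ_mul] at this
      omega
    · exact h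
    · have : (R + 1) * n ≤ r * n := Nat.mul_le_mul_right n h
      simp only [Nat.succ_mul] at this
      omega
  · rintro rfl; omega

lemma pvInner (cs : List Char) (m : Nat) (acc : List Char) (p : Nat) (h : p + m ≤ cs.length) :
    (List.range m).foldl
      (fun (st2 : List Char × Nat) _ => (st2.1 ++ [cs.getD st2.2 ' '], st2.2 + 1)) (acc, p)
    = (acc ++ (cs.drop p).take m, p + m) := by
  induction m with
  | zero => simp
  | succ m ih =>
    rw [List.range_succ, List.foldl_append, ih (by omega)]
    simp only [List.foldl_cons, List.foldl_nil]
    have hpm : p + m < cs.length := by omega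
    have h1 : (cs.drop p).take (m + 1) = (cs.drop p).take m ++ [cs.getD (p + m) ' '] := by
      rw [List.take_add_one]
      have : (cs.drop p)[m]? = some cs[p + m] := by
        rw [List.getElem?_drop]
        exact List.getElem?_eq_getElem hpm
      rw [this, List.getD_eq_getElem cs ' ' hpm]
      rfl
    rw [h1]
    simp [List.append_assoc]
    omega

lemma pvOuter (cs : List Char) (n k : Nat) (rows : List (List Char)) (p : Nat)
    (h : p + k * n ≤ cs.length) :
    (List.range k).foldl
      (fun st _ =>
        let inner := (List.range n).foldl
          (fun (st2 : List Char × Nat) _ => (st2.1 ++ [cs.getD st2.2 ' '], st2.2 + 1))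
          ([], st.2)
        (st.1 ++ [inner.1], inner.2))
      (rows, p)
    = (rows ++ (List.range k).map (fun r => (cs.drop (p + r * n)).take n), p + k * n) := by
  induction k with
  | zero => simp
  | succ k ih =>
    rw [List.range_succ, List.foldl_append, ih (by nlinarith)]
    simp only [List.foldl_cons, List.foldl_nil]
    rw [pvInner cs n [] (p + k * n) (by nlinarith)]
    rw [List.map_append]
    simp only [List.map_cons, List.map_nil, List.nil_append, Prod.mk.injEq, List.append_assoc]
    refine ⟨by simp, ?_⟩
    ring

lemma pvGridA_eq (cs : List Char) (n : Nat) (h : cs.length = n * n) :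
    (pvGridA cs n).1 = (List.range n).map (fun r => (cs.drop (r * n)).take n) := by
  unfold pvGridA
  rw [pvOuter cs n n [] 0 (by omega)]
  simp

lemma pvIndexUnique {α : Type} [BEq α] [LawfulBEq α] (l : List α) (v : α) (k : Nat)
    (hk : k < l.length) (hv : l[k] = v) (hmin : ∀ j (hj : j < l.length), l[j] = v → k ≤ j) :
    PySem.List.index? l v = some k := by
  rw [PySem.List.index?_eq_some_iff]
  refine ⟨l.take k, l.drop (k + 1), ?_, by simp [List.length_take]; omega, ?_⟩
  · conv_lhs => rw [← List.take_append_drop k l]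
    rw [List.drop_eq_getElem_cons hk, hv]
  · intro hmem
    obtain ⟨j, hj, hje⟩ := List.getElem_of_mem hmem
    have hjlt : j < k := by
      have := hmem
      have hlen : (l.take k).length = k := by simp [List.length_take]; omega
      omega
    rw [List.getElem_take] at hje
    exact absurd (hmin j (by omega) hje) (by omega)

lemma pvFoldKeep {α β : Type} (l : List α) (p : α → Prop) [DecidablePred p] (g : α → β) (b : β)
    (h : ∀ y ∈ l, p y → g y = b) :
    l.foldl (fun ri row => if p row then g row else ri) b = b := by
  induction l with
  | nil => rfl
  | cons a t ih =>
    simp only [List.foldl_cons]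
    by_cases hp : p a
    · rw [if_pos hp, h a (by simp) hp]
      exact ih (fun y hy => h y (by simp [hy]))
    · rw [if_neg hp]
      exact ih (fun y hy => h y (by simp [hy]))

lemma pvFoldLast {α β : Type} (l : List α) (p : α → Prop) [DecidablePred p] (g : α → β)
    (init : β) (x : α) (hx : x ∈ l) (hpx : p x) (huni : ∀ y ∈ l, p y → y = x) :
    l.foldl (fun ri row => if p row then g row else ri) init = g x := by
  induction l generalizing init with
  | nil => simp at hx
  | cons a t ih =>
    simp only [List.foldl_cons]
    by_cases hp : p a
    · rw [if_pos hp]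
      have ha : a = x := huni a (by simp) hp
      subst ha
      exact pvFoldKeep t p g (g a) (fun y hy hpy => by rw [huni y (by simp [hy]) hpy])
    · rw [if_neg hp]
      have hxt : x ∈ t := by
        rcases List.mem_cons.mp hx with h1 | h1
        · exact absurd (h1 ▸ hpx) hp
        · exact h1
      exact ih init hxt (fun y hy hpy => huni y (List.mem_cons_of_mem a hy) hpy)

lemma pvFoldFilterMem {α : Type} [DecidableEq α] (l : List α) (p : α → Bool) (init : List α) (x : α) :
    (x ∈ l.foldl (fun acc it => if p it then acc ++ [it] else acc) init) ↔
      (x ∈ init ∨ (x ∈ l ∧ p x = true)) := by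
  induction l generalizing init with
  | nil => simp
  | cons a t ih =>
    simp only [List.foldl_cons]
    by_cases hp : p a
    · rw [if_pos hp, ih]
      simp only [List.mem_append, List.mem_cons]
      constructor
      · rintro ((h | h) | h)
        · exact Or.inl h
        · simp only [List.not_mem_nil, or_false] at h
          exact Or.inr ⟨Or.inl h, h ▸ hp⟩
        · exact Or.inr ⟨Or.inr h.1, h.2⟩
      · rintro (h | ⟨(h | h), hpx⟩)
        · exact Or.inl (Or.inl h)
        · exact Or.inl (Or.inr (by simp [h]))
        · exact Or.inr ⟨h, hpx⟩
    · rw [if_neg hp, ih]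
      constructor
      · rintro (h | h)
        · exact Or.inl h
        · exact Or.inr ⟨by simp [h.1], h.2⟩
      · rintro (h | ⟨h, hpx⟩)
        · exact Or.inl h
        · rcases List.mem_cons.mp h with h1 | h1
          · exact absurd (h1 ▸ hpx) hp
          · exact Or.inr ⟨h1, hpx⟩

lemma pvFoldFilterMem3 (l : List Char) (b1 b2 : Bool) (u v : Char) (init : List Char) (x : Char) :
    (x ∈ l.foldl (fun acc item =>
        if b1 then (if item == u then acc ++ [item] else acc)
        else if b2 then (if item == v then acc ++ [item] else acc)
        else (if item == u || item == v then acc ++ [item] else acc)) init)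
    ↔ x ∈ init ∨ (x ∈ l ∧
        (if b1 then x == u else if b2 then x == v else (x == u || x == v)) = true) := by
  rw [pvStep_eq b1 b2 u v]
  exact pvFoldFilterMem l _ init x

set_option maxHeartbeats 2000000 in
lemma pvBody_eq (cs tl : List Char) (n : Nat) (hn : 2 ≤ n)
    (hlen : cs.length = n * n) (hone : cs.count '-' = 1) :
    pvABody cs tl n = pvBBody cs tl n := by
  -- locate the unique '-'
  have hmem : '-' ∈ cs := by
    have : 0 < cs.count '-' := by omega
    exact List.count_pos_iff.mp this
  obtain ⟨idx, hidx⟩ : ∃ k, PySem.List.index? cs '-' = some k := by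
    have := (PySem.List.index?_isSome_iff (xs := cs) (v := '-')).mpr hmem
    exact Option.isSome_iff_exists.mp this
  have hdec := (PySem.List.index?_eq_some_iff (xs := cs) (v := '-') (k := idx)).mp hidx
  obtain ⟨pre, suf, hcs, hplen, hpre⟩ := hdec
  have hsuf : '-' ∉ suf := by
    rw [hcs, List.count_append, List.count_cons_self] at hone
    have h0 : pre.count '-' = 0 := List.count_eq_zero.mpr hpre
    have : suf.count '-' = 0 := by omega
    exact List.count_eq_zero.mp this
  have hidxlt : idx < cs.length := by
    rw [hcs]; simp [List.length_append]; omega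
  have hat : cs.getD idx ' ' = '-' := by
    rw [List.getD_eq_getElem cs ' ' hidxlt, List.getElem_of_eq hcs]
    rw [List.getElem_append_right (by omega)]
    simp [hplen]
  have huni : ∀ j, j < cs.length → cs.getD j ' ' = '-' → j = idx := by
    intro j hj hv
    rw [List.getD_eq_getElem cs ' ' hj, List.getElem_of_eq hcs] at hv
    by_contra hne
    have hjlen : j < (pre ++ '-' :: suf).length := by
      simp [List.length_append]
      rw [hcs] at hj; simp [List.length_append] at hj; omega
    rcases Nat.lt_or_ge j idx with h | h
    · have hjpre : j < pre.length := by omega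
      rw [List.getElem_append_left (by omega)] at hv
      exact hpre (hv ▸ List.getElem_mem _)
    · have hgt : idx < j := by omega
      rw [List.getElem_append_right (by omega)] at hv
      have hm0 : j - pre.length ≠ 0 := by omega
      rcases Nat.exists_eq_succ_of_ne_zero hm0 with ⟨m, hm⟩
      simp only [hm] at hv
      rw [List.getElem_cons_succ] at hv
      exact hsuf (hv ▸ List.getElem_mem _)
  set R := idx / n with hR
  set C := idx % n with hCdef
  have hn0 : 0 < n := by omega
  have hC : C < n := Nat.mod_lt idx hn0
  have hRC : idx = R * n + C := by
    rw [hR, hCdef, Nat.mul_comm]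
    exact (Nat.div_add_mod idx n).symm
  have hRlt : R < n := by
    rw [hR]
    exact Nat.div_lt_of_lt_mul (by omega)
  -- grid facts
  have hgrid := pvGridA_eq cs n hlen
  have hblen : ∀ r, r < n → ((cs.drop (r * n)).take n).length = n := by
    intro r hr
    have : (r + 1) * n ≤ n * n := Nat.mul_le_mul_right n hr
    simp only [Nat.succ_mul] at this
    simp [List.length_take, List.length_drop, hlen]
    omega
  have hbget : ∀ r c, r < n → c < n → ((cs.drop (r * n)).take n).getD c ' ' = cs.getD (r * n + c) ' ' := by
    intro r c hr hc
    have h1 : c < ((cs.drop (r * n)).take n).length := by rw [hblen r hr]; exact hc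
    have h2 : r * n + c < cs.length := by
      have : (r + 1) * n ≤ n * n := Nat.mul_le_mul_right n hr
      simp only [Nat.succ_mul] at this
      omega
    rw [List.getD_eq_getElem _ ' ' h1, List.getD_eq_getElem _ ' ' h2]
    rw [List.getElem_take, List.getElem_drop]
  have hbmem : ∀ r, r < n → ('-' ∈ (cs.drop (r * n)).take n ↔ r = R) := by
    intro r hr
    rw [← pvRowOf n r R C hC]
    constructor
    · intro hm
      obtain ⟨c, hc, hceq⟩ := List.getElem_of_mem hm
      have hcn : c < n := by rw [hblen r hr] at hc; exact hc
      have : cs.getD (r * n + c) ' ' = '-' := by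
        rw [← hbget r c hr hcn, List.getD_eq_getElem _ ' ' hc, hceq]
      have h2 : r * n + c < cs.length := by
        have : (r + 1) * n ≤ n * n := Nat.mul_le_mul_right n hr
        simp only [Nat.succ_mul] at this
        omega
      have := huni (r * n + c) h2 this
      omega
    · rintro ⟨h1, h2⟩
      have hceq : r * n + (idx - r * n) = idx := by omega
      have hcn : idx - r * n < n := by omega
      have : ((cs.drop (r * n)).take n).getD (idx - r * n) ' ' = '-' := by
        rw [hbget r _ hr hcn, hceq, hat]
      rw [List.getD_eq_getElem _ ' ' (by rw [hblen r hr]; exact hcn)] at this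
      exact this ▸ List.getElem_mem _
  -- row index / col index
  have hp3len : ((List.range n).map (fun r => (cs.drop (r * n)).take n)).length = n := by simp
  have hp3get : ∀ r, r < n → ((List.range n).map (fun r => (cs.drop (r * n)).take n)).getD r []
      = (cs.drop (r * n)).take n := by
    intro r hr
    rw [List.getD_eq_getElem _ [] (by simpa using hr)]
    simp
  have hrowidx : PySem.List.index? ((List.range n).map (fun r => (cs.drop (r * n)).take n))
      ((cs.drop (R * n)).take n) = some R := by
    apply pvIndexUnique _ _ R (by simpa using hRlt)
    · simp
    · intro j hj hv
      simp at hj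
      simp [List.getElem_map] at hv
      have : '-' ∈ (cs.drop (j * n)).take n := by rw [hv]; exact (hbmem R hRlt).mpr rfl
      have := (hbmem j hj).mp this
      omega
  have hrowfold : ((List.range n).map (fun r => (cs.drop (r * n)).take n)).foldl
      (fun ri row => if '-' ∈ row then
        (PySem.List.index? ((List.range n).map (fun r => (cs.drop (r * n)).take n)) row).getD 0
        else ri) 0 = R := by
    rw [pvFoldLast (p := fun row => '-' ∈ row) (x := (cs.drop (R * n)).take n)
      (l := (List.range n).map (fun r => (cs.drop (r * n)).take n))
      (g := fun row => (PySem.List.index? ((List.range n).map (fun r => (cs.drop (r * n)).take n)) row).getD 0)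
      (init := 0)
      (hx := List.mem_map.mpr ⟨R, List.mem_range.mpr hRlt, rfl⟩)
      (hpx := (hbmem R hRlt).mpr rfl)
      (huni := by
        intro y hy hmy
        obtain ⟨r, hr, rfl⟩ := List.mem_map.mp hy
        rw [List.mem_range] at hr
        rw [(hbmem r hr).mp hmy])]
    rw [hrowidx]
    rfl
  have hcolidx : PySem.List.index? ((cs.drop (R * n)).take n) '-' = some C := by
    apply pvIndexUnique _ _ C (by rw [hblen R hRlt]; exact hC)
    · have := hbget R C hRlt hC
      rw [List.getD_eq_getElem _ ' ' (by rw [hblen R hRlt]; exact hC)] at this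
      rw [this, ← hRC, hat]
    · intro j hj hv
      rw [hblen R hRlt] at hj
      have : ((cs.drop (R * n)).take n).getD j ' ' = '-' := by
        rw [List.getD_eq_getElem _ ' ' (by rw [hblen R hRlt]; exact hj)]; exact hv
      rw [hbget R j hRlt hj] at this
      have h2 : R * n + j < cs.length := by
        have : (R + 1) * n ≤ n * n := Nat.mul_le_mul_right n hRlt
        simp only [Nat.succ_mul] at this
        omega
      have := huni (R * n + j) h2 this
      omega
  -- value / membership facts for the four neighbours
  have hlenrow : (List.take n (List.drop (R * n) cs)).length = n := hblen R hRlt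
  have e1 : C < n - 1 → (List.take n (List.drop (R * n) cs)).getD (C + 1) ' ' = cs.getD (idx + 1) ' ' := by
    intro h
    rw [hbget R (C + 1) hRlt (by omega)]
    congr 1; omega
  have e2 : 0 < C → (List.take n (List.drop (R * n) cs)).getD (C - 1) ' ' = cs.getD (idx - 1) ' ' := by
    intro h
    rw [hbget R (C - 1) hRlt (by omega)]
    congr 1; omega
  have hmul1 : (R + 1) * n = R * n + n := by rw [Nat.succ_mul]
  have e3 : R < n - 1 → ((List.map (fun r => List.take n (List.drop (r * n) cs)) (List.range n)).getD (R + 1) []).getD C ' ' = cs.getD (idx + n) ' ' := by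
    intro h
    rw [hp3get (R + 1) (by omega), hbget (R + 1) C (by omega) hC]
    congr 1; omega
  have e4 : 0 < R → ((List.map (fun r => List.take n (List.drop (r * n) cs)) (List.range n)).getD (R - 1) []).getD C ' ' = cs.getD (idx - n) ' ' := by
    intro h
    rw [hp3get (R - 1) (by omega), hbget (R - 1) C (by omega) hC]
    have hmul2 : (R - 1) * n + n = R * n := by
      have h1 : R - 1 + 1 = R := by omega
      calc (R - 1) * n + n = (R - 1 + 1) * n := (Nat.succ_mul _ _).symm
        _ = R * n := by rw [h1]
    have hnR : n ≤ R * n := by omega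
    congr 1; omega
  have m1 : C < n - 1 → cs.getD (idx + 1) ' ' ∈ List.take n (List.drop (R * n) cs) := by
    intro h
    rw [← e1 h, List.getD_eq_getElem _ ' ' (by omega)]
    exact List.getElem_mem _
  have m2 : 0 < C → cs.getD (idx - 1) ' ' ∈ List.take n (List.drop (R * n) cs) := by
    intro h
    rw [← e2 h, List.getD_eq_getElem _ ' ' (by omega)]
    exact List.getElem_mem _
  have m3 : R < n - 1 → cs.getD (idx + n) ' ' ∈ [] ++ List.map (fun i => ((List.map (fun r => List.take n (List.drop (r * n) cs)) (List.range n)).getD i []).getD C ' ') (List.range n) := by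
    intro h
    rw [List.nil_append]
    exact List.mem_map.mpr ⟨R + 1, List.mem_range.mpr (by omega), e3 h⟩
  have m4 : 0 < R → cs.getD (idx - n) ' ' ∈ [] ++ List.map (fun i => ((List.map (fun r => List.take n (List.drop (r * n) cs)) (List.range n)).getD i []).getD C ' ') (List.range n) := by
    intro h
    rw [List.nil_append]
    exact List.mem_map.mpr ⟨R - 1, List.mem_range.mpr (by omega), e4 h⟩
  -- horizontal and vertical characterisations
  have Hhor : ∀ c : Char, (c ∈ List.take n (List.drop (R * n) cs) ∧
      (if (C == 0) = true then c == (List.take n (List.drop (R * n) cs)).getD (C + 1) ' '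
       else if (C == n - 1) = true then c == (List.take n (List.drop (R * n) cs)).getD (C - 1) ' '
       else c == (List.take n (List.drop (R * n) cs)).getD (C + 1) ' '
            || c == (List.take n (List.drop (R * n) cs)).getD (C - 1) ' ') = true)
      ↔ ((0 < C ∧ c = cs.getD (idx - 1) ' ') ∨ (C < n - 1 ∧ c = cs.getD (idx + 1) ' ')) := by
    intro c
    by_cases hC0 : C = 0
    · have hcn : C < n - 1 := by omega
      rw [if_pos (by simp [hC0]), e1 hcn]
      simp only [beq_iff_eq]
      constructor
      · rintro ⟨-, h⟩
        exact Or.inr ⟨hcn, h⟩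
      · rintro (⟨h0, -⟩ | ⟨-, hc⟩)
        · omega
        · exact ⟨hc ▸ m1 hcn, hc⟩
    · by_cases hCl : C = n - 1
      · have h0 : 0 < C := by omega
        rw [if_neg (by simp [hC0]), if_pos (by simp [hCl]), e2 h0]
        simp only [beq_iff_eq]
        constructor
        · rintro ⟨-, h⟩
          exact Or.inl ⟨h0, h⟩
        · rintro (⟨-, hc⟩ | ⟨hr, -⟩)
          · exact ⟨hc ▸ m2 h0, hc⟩
          · omega
      · have h0 : 0 < C := by omega
        have hcn : C < n - 1 := by omega
        rw [if_neg (by simp [hC0]), if_neg (by simp [hCl]), e1 hcn, e2 h0]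
        simp only [Bool.or_eq_true, beq_iff_eq]
        constructor
        · rintro ⟨-, h | h⟩
          · exact Or.inr ⟨hcn, h⟩
          · exact Or.inl ⟨h0, h⟩
        · rintro (⟨-, hc⟩ | ⟨-, hc⟩)
          · exact ⟨hc ▸ m2 h0, Or.inr hc⟩
          · exact ⟨hc ▸ m1 hcn, Or.inl hc⟩
  have Hver : ∀ c : Char, (c ∈ [] ++ List.map (fun i => ((List.map (fun r => List.take n (List.drop (r * n) cs)) (List.range n)).getD i []).getD C ' ') (List.range n) ∧
      (if (R == 0) = true then c == ((List.map (fun r => List.take n (List.drop (r * n) cs)) (List.range n)).getD (R + 1) []).getD C ' '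
       else if (R == n - 1) = true then c == ((List.map (fun r => List.take n (List.drop (r * n) cs)) (List.range n)).getD (R - 1) []).getD C ' '
       else c == ((List.map (fun r => List.take n (List.drop (r * n) cs)) (List.range n)).getD (R + 1) []).getD C ' '
            || c == ((List.map (fun r => List.take n (List.drop (r * n) cs)) (List.range n)).getD (R - 1) []).getD C ' ') = true)
      ↔ ((0 < R ∧ c = cs.getD (idx - n) ' ') ∨ (R < n - 1 ∧ c = cs.getD (idx + n) ' ')) := by
    intro c
    by_cases hR0 : R = 0
    · have hrn : R < n - 1 := by omega
      rw [if_pos (by simp [hR0]), e3 hrn]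
      simp only [beq_iff_eq]
      constructor
      · rintro ⟨-, h⟩
        exact Or.inr ⟨hrn, h⟩
      · rintro (⟨h0, -⟩ | ⟨-, hc⟩)
        · omega
        · exact ⟨hc ▸ m3 hrn, hc⟩
    · by_cases hRl : R = n - 1
      · have h0 : 0 < R := by omega
        rw [if_neg (by simp [hR0]), if_pos (by simp [hRl]), e4 h0]
        simp only [beq_iff_eq]
        constructor
        · rintro ⟨-, h⟩
          exact Or.inl ⟨h0, h⟩
        · rintro (⟨-, hc⟩ | ⟨hr, -⟩)
          · exact ⟨hc ▸ m4 h0, hc⟩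
          · omega
      · have h0 : 0 < R := by omega
        have hrn : R < n - 1 := by omega
        rw [if_neg (by simp [hR0]), if_neg (by simp [hRl]), e3 hrn, e4 h0]
        simp only [Bool.or_eq_true, beq_iff_eq]
        constructor
        · rintro ⟨-, h | h⟩
          · exact Or.inr ⟨hrn, h⟩
          · exact Or.inl ⟨h0, h⟩
        · rintro (⟨-, hc⟩ | ⟨-, hc⟩)
          · exact ⟨hc ▸ m4 h0, Or.inr hc⟩
          · exact ⟨hc ▸ m3 hrn, Or.inl hc⟩
  have Hrhs : ∀ c : Char, (c ∈
      (((if 0 < C then [cs.getD (idx - 1) ' '] else []) ++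
            if C < n - 1 then [cs.getD (idx + 1) ' '] else []) ++
          if 0 < R then [cs.getD (idx - n) ' '] else []) ++
        if R < n - 1 then [cs.getD (idx + n) ' '] else [])
      ↔ ((0 < C ∧ c = cs.getD (idx - 1) ' ') ∨ (C < n - 1 ∧ c = cs.getD (idx + 1) ' ')
         ∨ (0 < R ∧ c = cs.getD (idx - n) ' ') ∨ (R < n - 1 ∧ c = cs.getD (idx + n) ' ')) := by
    intro c
    by_cases h1 : 0 < C <;> by_cases h2 : C < n - 1 <;> by_cases h3 : 0 < R <;>
      by_cases h4 : R < n - 1 <;>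
      simp [h1, h2, h3, h4]
  simp only [pvABody, pvBBody]
  rw [hidx]
  simp only [hgrid]
  rw [hrowfold]
  rw [hp3get R hRlt, hcolidx]
  simp only [Option.getD_some]
  apply pvAnyCongr
  intro c
  rw [PySem.List.foldl_append_singleton_eq_map]
  refine Iff.trans (pvFoldFilterMem3 _ _ _ _ _ _ _)
    (Iff.trans (or_congr (pvFoldFilterMem3 _ _ _ _ _ _ _) Iff.rfl) ?_)
  rw [← hCdef, ← hR]
  rw [Hhor c, Hver c, Hrhs c]
  simp only [List.not_mem_nil, false_or]
  exact or_assoc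


-- ===== VERDICT (by name: the statement is the Claim_ definition above) =====
theorem is_legal_move_spec : Claim_equal_is_legal_move := by
  intro puzzle tile_to_move _hdom hpre
  unfold Spec_is_legal_move
  obtain ⟨hlen5, hcount⟩ := hpre
  have hl : puzzle.toList.length = puzzle.length := String.length_toList
  rcases hlen5 with h | h | h | h | h
  · have hget : PySem.Dict.get? pvRootdict (PySem.Int.toStr (puzzle.length : Int)) = some 2 := by
      rw [h]; rfl
    simp only [is_legal_move, is_legal_move_alt, hget]
    exact pvBody_eq _ _ _ (by norm_num) (by rw [hl, h]; rfl) hcount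
  · have hget : PySem.Dict.get? pvRootdict (PySem.Int.toStr (puzzle.length : Int)) = some 3 := by
      rw [h]; rfl
    simp only [is_legal_move, is_legal_move_alt, hget]
    exact pvBody_eq _ _ _ (by norm_num) (by rw [hl, h]; rfl) hcount
  · have hget : PySem.Dict.get? pvRootdict (PySem.Int.toStr (puzzle.length : Int)) = some 4 := by
      rw [h]; rfl
    simp only [is_legal_move, is_legal_move_alt, hget]
    exact pvBody_eq _ _ _ (by norm_num) (by rw [hl, h]; rfl) hcount
  · have hget : PySem.Dict.get? pvRootdict (PySem.Int.toStr (puzzle.length : Int)) = some 5 := by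
      rw [h]; rfl
    simp only [is_legal_move, is_legal_move_alt, hget]
    exact pvBody_eq _ _ _ (by norm_num) (by rw [hl, h]; rfl) hcount
  · have hget : PySem.Dict.get? pvRootdict (PySem.Int.toStr (puzzle.length : Int)) = some 6 := by
      rw [h]; rfl
    simp only [is_legal_move, is_legal_move_alt, hget]
    exact pvBody_eq _ _ _ (by norm_num) (by rw [hl, h]; rfl) hcount
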